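-- pv_equiv track=rewrite | github.com/MadisonAster/KungFu | Python/Algorithms/_CodeWars/skyscrapers.py | CollapsePossibilities
-- ===== SOURCE A (Python) =====
-- def CollapsePossibilities(orders): #Collapse list of possible orders to list of possibilities for each cell
--     d = len(orders[0])
--
--     result = []
--     for i in list(range(d)):
--         subset = []
--         for order in orders:
--             subset.append(order[i])
--         subset = list(set(subset))
--         subset.sort()
--         result.append(subset)
--     return result
-- ===== SOURCE B (Python) =====
-- def CollapsePossibilities(orders):  # incremental: keep each column as a sorted duplicate-free list, ordered-insert every value
--     result = [[] for _ in orders[0]]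
--     for order in orders:
--         for col, v in zip(result, order):
--             k = 0
--             while k < len(col) and col[k] < v:
--                 k += 1
--             if k == len(col) or col[k] != v:
--                 col.insert(k, v)
--     return result
-- ===== Notes on version B (the rewrite author's own statement) =====
-- stated objective: alternative
-- what changed: A gathers each column by a nested scan, deduplicates it through a set and then sorts it; B never builds sets or calls sort: it keeps every column as a sorted duplicate-free list throughout and does an ordered insertion (scan to position, skip duplicates) for each cell in one pass over the rows.
import Mathlib
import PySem

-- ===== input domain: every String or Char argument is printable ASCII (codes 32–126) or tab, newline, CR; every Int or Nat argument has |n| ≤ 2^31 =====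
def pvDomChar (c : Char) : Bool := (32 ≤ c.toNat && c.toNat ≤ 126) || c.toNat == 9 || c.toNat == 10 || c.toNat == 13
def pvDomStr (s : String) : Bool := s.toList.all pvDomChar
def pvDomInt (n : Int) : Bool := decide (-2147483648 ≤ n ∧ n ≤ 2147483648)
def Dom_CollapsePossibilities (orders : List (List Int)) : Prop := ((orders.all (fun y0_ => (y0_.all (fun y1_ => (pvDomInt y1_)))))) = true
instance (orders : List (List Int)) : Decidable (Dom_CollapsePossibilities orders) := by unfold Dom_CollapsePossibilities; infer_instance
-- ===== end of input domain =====

-- B replaces A's gather-per-column / set / sort pipeline by one pass over the rows that keeps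
-- every column as a sorted duplicate-free list via ordered insertion (alternative algorithm).

-- ===== PORT A =====
def CollapsePossibilities (orders : List (List Int)) : List (List Int) :=
  let d : Nat := (orders.headD []).length    -- orders[0] raises IndexError on []: excluded by Pre_
  (PySem.List.pyRange 0 (d : Int) 1).foldl (fun result i =>
    let subset := orders.foldl (fun subset order =>
      subset ++ [PySem.List.pyGetD order i 0]) []   -- order[i]: in range under Pre_
    let subset := PySem.Set.ofList subset
    let subset := PySem.List.sorted subset (fun x => x) false
    result ++ [subset]) []

-- ===== PORT B =====
-- the inner 'k = 0; while k < len(col) and col[k] < v: k += 1; if k == len(col) or col[k] != v: col.insert(k, v)'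
-- as the obvious structural recursion over col (same comparisons, same order)
def pvInsort (col : List Int) (v : Int) : List Int :=
  match col with
  | [] => [v]
  | c :: cs => if c < v then c :: pvInsort cs v else if c ≠ v then v :: c :: cs else c :: cs

def CollapsePossibilities_alt (orders : List (List Int)) : List (List Int) :=
  let result : List (List Int) := (orders.headD []).map (fun _ => ([] : List Int))  -- orders[0]: excluded by Pre_ on []
  orders.foldl (fun result order =>
    (result.zip order).map (fun p => pvInsort p.1 p.2)
      ++ result.drop order.length) result   -- columns beyond len(order) are left untouched

-- ===== PRECONDITION & SPEC =====
-- Pre_ excludes exactly the inputs where the Python A raises IndexError: empty orders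
-- (orders[0]) and ragged inputs with a row shorter than the first row (order[i]).
def Pre_CollapsePossibilities (orders : List (List Int)) : Prop :=
  orders ≠ [] ∧ ∀ o ∈ orders, (orders.headD []).length ≤ o.length
instance (orders : List (List Int)) : Decidable (Pre_CollapsePossibilities orders) := by
  unfold Pre_CollapsePossibilities; infer_instance
def pvWitness_CollapsePossibilities : List (List Int) := [[1, 2], [2, 1], [1, 3]]

def Spec_CollapsePossibilities (orders : List (List Int)) (out : List (List Int)) : Prop := out = CollapsePossibilities_alt orders
instance (orders : List (List Int)) (out : List (List Int)) : Decidable (Spec_CollapsePossibilities orders out) := by unfold Spec_CollapsePossibilities; infer_instance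

-- ===== CLAIM (what is proved, stated in full; the proofs are below) =====
def Claim_equal_CollapsePossibilities : Prop := ∀ (orders : List (List Int)), Dom_CollapsePossibilities orders → Pre_CollapsePossibilities orders → Spec_CollapsePossibilities orders (CollapsePossibilities orders)

-- ===== LEMMAS AND PROOFS =====

theorem pv_mem_insort (col : List Int) (v a : Int) :
    a ∈ pvInsort col v ↔ a = v ∨ a ∈ col := by
  induction col with
  | nil => simp [pvInsort]
  | cons c cs ih =>
    by_cases h1 : c < v
    · simp only [pvInsort, if_pos h1, List.mem_cons, ih]; tauto
    · by_cases h2 : c = v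
      · subst h2
        rw [pvInsort, if_neg h1, if_neg (by simp)]
        simp only [List.mem_cons]; tauto
      · simp only [pvInsort, if_neg h1, if_pos h2, List.mem_cons]

theorem pv_pairwise_insort (col : List Int) (v : Int) (h : col.Pairwise (· < ·)) :
    (pvInsort col v).Pairwise (· < ·) := by
  induction col with
  | nil => simp [pvInsort]
  | cons c cs ih =>
    rw [List.pairwise_cons] at h
    by_cases h1 : c < v
    · rw [pvInsort, if_pos h1, List.pairwise_cons]
      refine ⟨fun a ha => ?_, ih h.2⟩
      rcases (pv_mem_insort cs v a).1 ha with rfl | ha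
      · exact h1
      · exact h.1 a ha
    · by_cases h2 : c = v
      · subst h2; simpa [pvInsort, h1, List.pairwise_cons] using h
      · have hvc : v < c := by omega
        rw [pvInsort, if_neg h1, if_pos h2, List.pairwise_cons]
        exact ⟨fun a ha => by rcases List.mem_cons.1 ha with rfl | ha; · exact hvc
                              · exact lt_trans hvc (h.1 a ha), List.pairwise_cons.2 h⟩

-- folding pvInsort over xs starting from [] builds exactly sorted(set(xs))
theorem pv_foldl_insort (xs : List Int) :
    xs.foldl pvInsort [] = PySem.List.sorted (PySem.Set.ofList xs) (fun x => x) false := by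
  have key : ∀ (acc : List Int), acc.Pairwise (· < ·) →
      (xs.foldl pvInsort acc).Pairwise (· < ·) ∧
      (∀ a, a ∈ xs.foldl pvInsort acc ↔ a ∈ acc ∨ a ∈ xs) := by
    induction xs with
    | nil => intro acc hacc; simpa using hacc
    | cons x t ih =>
      intro acc hacc
      obtain ⟨hp, hm⟩ := ih (pvInsort acc x) (pv_pairwise_insort acc x hacc)
      refine ⟨hp, fun a => ?_⟩
      rw [List.foldl_cons] at *
      rw [hm a, pv_mem_insort]
      simp only [List.mem_cons]; tauto
  obtain ⟨hp, hm⟩ := key [] (by simp)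
  symm
  refine PySem.List.sorted_eq_of_perm_of_pairwise_lt _ _ _ ?_ hp
  refine (List.perm_ext_iff_of_nodup (hp.imp fun h => ne_of_lt h) (PySem.Set.nodup_ofList xs)).2
    (fun a => ?_)
  rw [hm a, PySem.Set.mem_ofList]; simp

-- one row of B's pass, on a column list given pointwise by g over List.range d
theorem pv_rowStep (d : Nat) (g : Nat → List Int) (o : List Int) (ho : d ≤ o.length) :
    (((List.range d).map g).zip o).map (fun p => pvInsort p.1 p.2)
        ++ ((List.range d).map g).drop o.length
      = (List.range d).map (fun k => pvInsort (g k) (o.getD k 0)) := by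
  rw [List.drop_eq_nil_of_le (by simpa using ho), List.append_nil]
  apply List.ext_getElem
  · simp [Nat.min_eq_left ho]
  · intro k h1 h2
    have hk : k < d := by simpa using h2
    have hko : k < o.length := lt_of_lt_of_le hk ho
    simp [List.getElem_zip, List.getD, List.getElem?_eq_getElem hko]

-- B's outer pass computes each column's fold independently
theorem pv_outer (orders : List (List Int)) (d : Nat) (g : Nat → List Int)
    (h : ∀ o ∈ orders, d ≤ o.length) :
    orders.foldl (fun result order =>
        (result.zip order).map (fun p => pvInsort p.1 p.2)
          ++ result.drop order.length) ((List.range d).map g)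
      = (List.range d).map
          (fun k => orders.foldl (fun c o => pvInsort c (o.getD k 0)) (g k)) := by
  induction orders generalizing g with
  | nil => simp
  | cons o os ih =>
    simp only [List.foldl_cons]
    rw [pv_rowStep d g o (h o (by simp))]
    exact ih (fun k => pvInsort (g k) (o.getD k 0)) (fun o' ho' => h o' (by simp [ho']))

-- ===== VERDICT (by name: the statement is the Claim_ definition above) =====
theorem CollapsePossibilities_spec : Claim_equal_CollapsePossibilities := by
  intro orders _ hpre
  unfold Spec_CollapsePossibilities CollapsePossibilities CollapsePossibilities_alt
  dsimp only
  set d : Nat := (orders.headD []).length with hd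
  -- B side
  rw [show (orders.headD []).map (fun _ => ([] : List Int)) = (List.range d).map (fun _ => ([] : List Int)) by
        apply List.ext_getElem <;> simp [hd]]
  rw [pv_outer orders d (fun _ => []) (fun o ho => hpre.2 o ho)]
  -- A side: outer foldl-append is a map, inner foldl-append is a map
  rw [PySem.List.foldl_append_singleton_eq_map]
  rw [PySem.List.pyRange_zero_nat]
  rw [List.map_map]
  refine List.map_congr_left (fun k hk => ?_)
  have hkd : k < d := List.mem_range.1 hk
  have h1 : orders.foldl (fun subset order => subset ++ [PySem.List.pyGetD order (k : Int) 0]) []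
      = orders.map (fun order => PySem.List.pyGetD order (k : Int) 0) := by
    simpa using PySem.List.foldl_append_singleton_eq_map (fun order => PySem.List.pyGetD order (k : Int) 0) orders []
  simp only [Function.comp, h1]
  have h2 : ∀ o ∈ orders, PySem.List.pyGetD o (k : Int) 0 = o.getD k 0 := by
    intro o ho
    rw [PySem.List.pyGetD_natCast]
  rw [List.map_congr_left h2]
  have h3 : orders.foldl (fun c o => pvInsort c (o.getD k 0)) []
      = (orders.map (fun o => o.getD k 0)).foldl pvInsort [] := by
    rw [List.foldl_map]
  rw [h3, pv_foldl_insort]
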